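-- pv_equiv track=rewrite | github.com/russellmiller49/proc_suite_deploy | app/phi/safety/veto.py | _repair_bio
-- ===== SOURCE A (Python) =====
-- from typing import List, Tuple
--
-- def _repair_bio(tags: List[str]) -> List[str]:
--     corrected = tags[:]
--     prev_type = "O"
--     for i, tag in enumerate(corrected):
--         if not tag or tag == "O":
--             prev_type = "O"
--             corrected[i] = "O"
--             continue
--         if "-" not in tag:
--             corrected[i] = "O"
--             prev_type = "O"
--             continue
--         prefix, label = tag.split("-", 1)
--         if prefix == "B":
--             prev_type = label
--             continue
--         if prefix == "I":
--             if prev_type != label: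
--                 corrected[i] = f"B-{label}"
--                 prev_type = label
--             else:
--                 prev_type = label
--             continue
--         corrected[i] = "O"
--         prev_type = "O"
--     return corrected
-- ===== SOURCE B (Python) =====
-- def _repair_bio(tags):
--     # Tokenize each tag, group the token stream into maximal runs (segments),
--     # then render each segment; the output is the concatenation of renderings.
--     def parse(t):
--         if not t or t == "O" or "-" not in t:
--             return ("O", "O")
--         prefix, label = t.split("-", 1)
--         return (prefix, label) if prefix in ("B", "I") else ("O", "O")
--
--     toks = [parse(t) for t in tags]
--     n = len(toks)
--     segments = []  # (kind, label, length); kind in {"O", "SPAN", "CONT"}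
--     i = 0
--     while i < n:
--         kind, label = toks[i]
--         if kind == "O":
--             j = i + 1
--             while j < n and toks[j][0] == "O":
--                 j += 1
--             segments.append(("O", "O", j - i))
--         else:
--             prev_label = toks[i - 1][1] if i else "O"
--             headed = kind == "B" or label != prev_label
--             j = i + 1
--             while j < n and toks[j] == ("I", label):
--                 j += 1
--             segments.append(("SPAN" if headed else "CONT", label, j - i))
--         i = j
--
--     out = []
--     for kind, label, length in segments:
--         if kind == "O":
--             out.extend(["O"] * length)
--         elif kind == "SPAN":
--             out.append("B-" + label)
--             out.extend(["I-" + label] * (length - 1))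
--         else:  # CONT: dangling I-run whose label matches the ambient context
--             out.extend(["I-" + label] * length)
--     return out
-- ===== Notes on version B (the rewrite author's own statement) =====
-- stated objective: alternative
-- what changed: Replaces A's single stateful in-place rewrite loop with a tokenize/segment/render pipeline: parse each tag to a (kind, label) token, group the token stream into maximal runs as an explicit segment list (O-runs, entity spans, dangling I-runs) with lengths, then render each segment and concatenate; the input list is not mutated.
import Mathlib
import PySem

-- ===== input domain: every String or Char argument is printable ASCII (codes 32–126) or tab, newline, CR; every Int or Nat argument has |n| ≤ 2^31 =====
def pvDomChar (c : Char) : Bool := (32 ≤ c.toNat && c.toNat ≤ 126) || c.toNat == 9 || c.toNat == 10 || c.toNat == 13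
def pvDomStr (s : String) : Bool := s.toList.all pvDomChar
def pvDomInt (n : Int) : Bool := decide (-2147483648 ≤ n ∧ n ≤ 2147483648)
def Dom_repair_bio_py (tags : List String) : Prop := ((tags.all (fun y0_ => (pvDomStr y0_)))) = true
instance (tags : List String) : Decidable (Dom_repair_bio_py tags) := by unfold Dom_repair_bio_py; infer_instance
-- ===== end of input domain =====

-- B replaces A's stateful in-place rewrite with a tokenize → segment-into-runs → render
-- pipeline over an explicit segment list (objective: alternative; return value identical).

-- shared helper: exact port of s.split("-", 1) on the character list (first '-' splits;
-- exact when a '-' is present, the only case either Python uses the result in).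
def splitDashL : List Char → List Char × List Char
  | [] => ([], [])
  | c :: cs =>
    if c = '-' then ([], cs)
    else
      let p := splitDashL cs
      (c :: p.1, p.2)

-- ===== PORT A =====
-- prev_type carried as a character list ("O" = ['O']); corrected[i] assignments become the
-- emitted head of the recursion; f"B-{label}" = String.ofList ('B' :: '-' :: label).
def repairAuxA (prev : List Char) : List String → List String
  | [] => []
  | t :: rest =>
    if t = "" ∨ t = "O" then "O" :: repairAuxA ['O'] rest
    else if ¬ t.toList.contains '-' then "O" :: repairAuxA ['O'] rest
    else
      let pr := (splitDashL t.toList).1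
      let lb := (splitDashL t.toList).2
      if pr = ['B'] then t :: repairAuxA lb rest
      else if pr = ['I'] then
        (if prev ≠ lb then String.ofList ('B' :: '-' :: lb) else t) :: repairAuxA lb rest
      else "O" :: repairAuxA ['O'] rest

def repair_bio_py (tags : List String) : List String := repairAuxA ['O'] tags

-- ===== PORT B =====
-- token = (kind, label): kind "O"/"B"/"I", label as char list ("O" for O/invalid tags)
def parseTag (t : String) : String × List Char :=
  if t = "" ∨ t = "O" ∨ ¬ t.toList.contains '-' then ("O", ['O'])
  else
    let pr := (splitDashL t.toList).1
    let lb := (splitDashL t.toList).2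
    if pr = ['B'] then ("B", lb)
    else if pr = ['I'] then ("I", lb)
    else ("O", ['O'])

-- the inner `while` loops of Source B's segmentation: split off a leading run
def takeO : List (String × List Char) → Nat × List (String × List Char)
  | [] => (0, [])
  | tok :: rest =>
    if tok.1 = "O" then
      let p := takeO rest
      (p.1 + 1, p.2)
    else (0, tok :: rest)

def takeCont (lb : List Char) : List (String × List Char) → Nat × List (String × List Char)
  | [] => (0, [])
  | tok :: rest =>
    if tok = ("I", lb) then
      let p := takeCont lb rest
      (p.1 + 1, p.2)
    else (0, tok :: rest)

theorem takeO_len : ∀ (ts : List (String × List Char)), (takeO ts).2.length ≤ ts.length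
  | [] => Nat.le_refl _
  | tok :: rest => by
    by_cases h : tok.1 = "O"
    · simpa [takeO, h] using Nat.le_succ_of_le (takeO_len rest)
    · simp [takeO, h]

theorem takeCont_len (lb : List Char) :
    ∀ (ts : List (String × List Char)), (takeCont lb ts).2.length ≤ ts.length
  | [] => Nat.le_refl _
  | tok :: rest => by
    by_cases h : tok = ("I", lb)
    · simpa [takeCont, h] using Nat.le_succ_of_le (takeCont_len lb rest)
    · simp [takeCont, h]

-- Source B's outer while: group the token stream into segments (kind, label, length)
def segs (prev : List Char) : List (String × List Char) → List (String × List Char × Nat)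
  | [] => []
  | (k, lb) :: rest =>
    if k = "O" then
      ("O", ['O'], (takeO rest).1 + 1) :: segs ['O'] (takeO rest).2
    else
      ((if k = "B" ∨ lb ≠ prev then "SPAN" else "CONT"), lb, (takeCont lb rest).1 + 1)
        :: segs lb (takeCont lb rest).2
termination_by ts => ts.length
decreasing_by
  · exact Nat.lt_succ_of_le (takeO_len rest)
  · exact Nat.lt_succ_of_le (takeCont_len lb rest)

def renderSeg : String × List Char × Nat → List String
  | (k, lb, len) =>
    if k = "O" then List.replicate len "O"
    else if k = "SPAN" then
      String.ofList ('B' :: '-' :: lb) :: List.replicate (len - 1) (String.ofList ('I' :: '-' :: lb))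
    else List.replicate len (String.ofList ('I' :: '-' :: lb))

def repair_bio_py_alt (tags : List String) : List String :=
  (segs ['O'] (tags.map parseTag)).flatMap renderSeg

-- ===== PRECONDITION & SPEC =====
def Spec_repair_bio_py (tags : List String) (out : List String) : Prop := out = repair_bio_py_alt tags
instance (tags : List String) (out : List String) : Decidable (Spec_repair_bio_py tags out) := by unfold Spec_repair_bio_py; infer_instance

-- ===== CLAIM (what is proved, stated in full; the proofs are below) =====
def Claim_equal_repair_bio_py : Prop := ∀ (tags : List String), Dom_repair_bio_py tags → Spec_repair_bio_py tags (repair_bio_py tags)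

-- ===== LEMMAS AND PROOFS =====

-- common sequential semantics on the token stream, with the previous label as the state
def tokSpec (prev : List Char) : List (String × List Char) → List String
  | [] => []
  | (k, lb) :: rest =>
    if k = "O" then "O" :: tokSpec ['O'] rest
    else if k = "B" then String.ofList ('B' :: '-' :: lb) :: tokSpec lb rest
    else (if lb ≠ prev then String.ofList ('B' :: '-' :: lb) else String.ofList ('I' :: '-' :: lb))
      :: tokSpec lb rest

theorem splitDash_cons (l : List Char) (c : Char)
    (h1 : (splitDashL l).1 = [c]) (h2 : l.contains '-' = true) :
    l = c :: '-' :: (splitDashL l).2 := by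
  cases l with
  | nil => simp [splitDashL] at h1
  | cons a as =>
    by_cases ha : a = '-'
    · simp [splitDashL, ha] at h1
    · simp only [splitDashL, if_neg ha] at h1 ⊢
      have hac : a = c := by simpa using congrArg (fun x => x.headD a) h1
      have hnil : (splitDashL as).1 = [] := by simpa using congrArg List.tail h1
      have h2' : as.contains '-' = true := by
        have hm : '-' = a ∨ '-' ∈ as := by simpa using h2
        rcases hm with h | h
        · exact absurd h.symm ha
        · simpa using h
      subst hac
      cases as with
      | nil => simp at h2'
      | cons b bs =>
        by_cases hb : b = '-'
        · simp [splitDashL, hb]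
        · simp [splitDashL, if_neg hb] at hnil

theorem ofList_eq_of_toList (t : String) (l : List Char) (h : t.toList = l) :
    String.ofList l = t := by
  rw [← h]; exact String.ofList_toList

-- A's loop equals the sequential token semantics
theorem A_eq_tokSpec (ts : List String) (prev : List Char) :
    repairAuxA prev ts = tokSpec prev (ts.map parseTag) := by
  induction ts generalizing prev with
  | nil => rfl
  | cons t rest ih =>
    by_cases h0 : t = "" ∨ t = "O" ∨ ¬ t.toList.contains '-' = true
    · have hA : repairAuxA prev (t :: rest) = "O" :: repairAuxA ['O'] rest := by
        rcases h0 with h | h | h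
        · rw [repairAuxA, if_pos (Or.inl h)]
        · rw [repairAuxA, if_pos (Or.inr h)]
        · by_cases h1 : t = "" ∨ t = "O"
          · rw [repairAuxA, if_pos h1]
          · rw [repairAuxA, if_neg h1, if_pos h]
      have hp : parseTag t = ("O", ['O']) := by unfold parseTag; rw [if_pos h0]
      rw [hA, List.map_cons, hp, tokSpec, if_pos rfl, ih]
    · simp only [not_or, not_not] at h0
      obtain ⟨h1, h2, h3⟩ := h0
      have hne : ¬ (t = "" ∨ t = "O") := by rintro (h | h) <;> [exact h1 h; exact h2 h]
      have hnc : ¬ ¬ t.toList.contains '-' = true := not_not_intro h3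
      by_cases hB : (splitDashL t.toList).1 = ['B']
      · have hp : parseTag t = ("B", (splitDashL t.toList).2) := by
          unfold parseTag; rw [if_neg (by tauto), if_pos hB]
        have ht : String.ofList ('B' :: '-' :: (splitDashL t.toList).2) = t :=
          ofList_eq_of_toList _ _ (splitDash_cons _ _ hB h3)
        rw [repairAuxA, if_neg hne, if_neg hnc, if_pos hB, List.map_cons, hp, tokSpec,
          if_neg (by decide), if_pos rfl, ht, ih]
      · by_cases hI : (splitDashL t.toList).1 = ['I']
        · have hp : parseTag t = ("I", (splitDashL t.toList).2) := by
            unfold parseTag; rw [if_neg (by tauto), if_neg hB, if_pos hI]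
          have ht : String.ofList ('I' :: '-' :: (splitDashL t.toList).2) = t :=
            ofList_eq_of_toList _ _ (splitDash_cons _ _ hI h3)
          rw [repairAuxA, if_neg hne, if_neg hnc, if_neg hB, if_pos hI, List.map_cons, hp,
            tokSpec, ih]
          simp only [String.reduceEq, reduceIte]
          congr 1
          by_cases hd : (splitDashL t.toList).2 = prev
          · have e1 : ¬ prev ≠ (splitDashL t.toList).2 := fun h => h hd.symm
            have e2 : ¬ (splitDashL t.toList).2 ≠ prev := fun h => h hd
            rw [if_neg e1, if_neg e2]
            exact ht.symm
          · have e1 : prev ≠ (splitDashL t.toList).2 := fun h => hd h.symm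
            rw [if_pos e1, if_pos hd]
        · have hp : parseTag t = ("O", ['O']) := by
            unfold parseTag; rw [if_neg (by tauto), if_neg hB, if_neg hI]
          rw [repairAuxA, if_neg hne, if_neg hnc, if_neg hB, if_neg hI, List.map_cons, hp,
            tokSpec, if_pos rfl, ih]

-- the O-run absorbed by takeO matches tokSpec step by step
theorem takeO_run : ∀ (ts : List (String × List Char)),
    List.replicate (takeO ts).1 "O" ++ tokSpec ['O'] (takeO ts).2 = tokSpec ['O'] ts
  | [] => rfl
  | (k, lb) :: rest => by
    by_cases h : k = "O"
    · have he : takeO ((k, lb) :: rest) = ((takeO rest).1 + 1, (takeO rest).2) := by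
        simp [takeO, h]
      rw [he, List.replicate_succ, List.cons_append, takeO_run rest, tokSpec, if_pos h]
    · simp [takeO, h]

-- the I-run absorbed by takeCont matches tokSpec step by step
theorem takeCont_run (lb : List Char) : ∀ (ts : List (String × List Char)),
    List.replicate (takeCont lb ts).1 (String.ofList ('I' :: '-' :: lb))
      ++ tokSpec lb (takeCont lb ts).2 = tokSpec lb ts
  | [] => rfl
  | tok :: rest => by
    by_cases h : tok = ("I", lb)
    · have he : takeCont lb (tok :: rest) = ((takeCont lb rest).1 + 1, (takeCont lb rest).2) := by
        simp [takeCont, h]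
      subst h
      rw [he, List.replicate_succ, List.cons_append, takeCont_run lb rest, tokSpec,
        if_neg (by decide), if_neg (by decide), if_neg (by simp)]
    · simp [takeCont, h]

-- B's segmentation + rendering equals the sequential token semantics
theorem segs_render (ts : List (String × List Char)) (prev : List Char) :
    (segs prev ts).flatMap renderSeg = tokSpec prev ts := by
  induction hn : ts.length using Nat.strong_induction_on generalizing ts prev with
  | _ n ih =>
    match ts with
    | [] => rw [segs]; rfl
    | (k, lb) :: rest =>
      by_cases h : k = "O"
      · rw [segs, if_pos h, List.flatMap_cons, renderSeg, if_pos rfl,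
          ih (takeO rest).2.length
            (by subst hn; exact Nat.lt_succ_of_le (takeO_len rest)) _ _ rfl,
          List.replicate_succ, List.cons_append, takeO_run rest, tokSpec, if_pos h]
      · rw [segs, if_neg h, List.flatMap_cons,
          ih (takeCont lb rest).2.length
            (by subst hn; exact Nat.lt_succ_of_le (takeCont_len lb rest)) _ _ rfl]
        by_cases hh : k = "B" ∨ lb ≠ prev
        · rw [if_pos hh, renderSeg, if_neg (by decide), if_pos rfl, Nat.add_sub_cancel,
            List.cons_append, takeCont_run lb rest, tokSpec, if_neg h]
          rcases hh with hB | hne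
          · rw [if_pos hB]
          · by_cases hB : k = "B"
            · rw [if_pos hB]
            · rw [if_neg hB, if_pos hne]
        · have hB : ¬ k = "B" := fun h' => hh (Or.inl h')
          have hprev : ¬ lb ≠ prev := fun h' => hh (Or.inr h')
          rw [if_neg hh, renderSeg, if_neg (by decide), if_neg (by decide),
            List.replicate_succ, List.cons_append, takeCont_run lb rest, tokSpec,
            if_neg h, if_neg hB, if_neg hprev]

-- ===== VERDICT (by name: the statement is the Claim_ definition above) =====
theorem repair_bio_py_spec : Claim_equal_repair_bio_py := by
  intro tags _
  unfold Spec_repair_bio_py repair_bio_py repair_bio_py_alt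
  rw [A_eq_tokSpec, segs_render]
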